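-- pv_equiv track=rewrite | github.com/Plick000/open-source-dubbing-tool | Python/V2/__timestamps_titles_cal__.py | gather_end_candidates
-- ===== SOURCE A (Python) =====
-- from typing import Any, Dict, List, Optional, Tuple
--
-- def gather_end_candidates(
--     clips_by_end: Dict[int, List[Dict[str, Any]]],
--     want_end: int,
--     max_end_delta: int
-- ) -> List[Dict[str, Any]]:
--     out: List[Dict[str, Any]] = []
--     for d in range(-max_end_delta, max_end_delta + 1):
--         out.extend(clips_by_end.get(want_end + d, []))
--     return out
-- ===== SOURCE B (Python) =====
-- def gather_end_candidates(clips_by_end, want_end, max_end_delta):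
--     in_window = [
--         clips
--         for key, clips in sorted(clips_by_end.items(), key=lambda kv: kv[0])
--         if abs(key - want_end) <= max_end_delta
--     ]
--     return [clip for clips in in_window for clip in clips]
-- ===== Notes on version B (the rewrite author's own statement) =====
-- stated objective: simpler
-- what changed: B never scans the dense offset range or performs dict lookups: it sorts the dict's (key, clips) items once, keeps the items whose key lies within the window by a direct |key - want_end| <= max_end_delta test, and flattens their clip lists.
import Mathlib
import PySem

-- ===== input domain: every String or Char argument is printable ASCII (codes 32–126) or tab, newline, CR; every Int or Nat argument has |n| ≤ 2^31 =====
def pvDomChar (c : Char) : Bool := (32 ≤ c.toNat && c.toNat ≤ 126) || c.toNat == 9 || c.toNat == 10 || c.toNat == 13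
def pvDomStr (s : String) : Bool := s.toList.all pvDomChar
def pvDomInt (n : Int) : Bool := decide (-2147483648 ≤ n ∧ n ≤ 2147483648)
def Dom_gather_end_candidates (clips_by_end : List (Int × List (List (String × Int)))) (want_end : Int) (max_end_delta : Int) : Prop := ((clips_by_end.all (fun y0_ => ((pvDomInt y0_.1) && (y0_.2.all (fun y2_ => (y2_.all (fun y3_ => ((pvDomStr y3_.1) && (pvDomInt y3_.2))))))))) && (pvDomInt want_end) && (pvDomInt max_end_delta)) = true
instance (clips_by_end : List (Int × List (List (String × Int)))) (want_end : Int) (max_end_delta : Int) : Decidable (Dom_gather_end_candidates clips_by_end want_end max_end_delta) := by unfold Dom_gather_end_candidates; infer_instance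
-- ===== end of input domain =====

-- B sorts the dict's (key, clips) items once and flattens the items whose key passes a direct
-- window test, instead of densely scanning every offset with dict lookups; objective: simpler.

-- ===== PORT A =====
def gather_end_candidates (clips_by_end : List (Int × List (List (String × Int)))) (want_end : Int) (max_end_delta : Int) : List (List (String × Int)) :=
  (PySem.List.pyRange (-max_end_delta) (max_end_delta + 1) 1).foldl
    (fun out d => out ++ (PySem.Dict.mk clips_by_end).getD (want_end + d) []) []

-- ===== PORT B =====
def gather_end_candidates_alt (clips_by_end : List (Int × List (List (String × Int)))) (want_end : Int) (max_end_delta : Int) : List (List (String × Int)) :=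
  (((PySem.List.sorted clips_by_end (fun kv => kv.1) false).filter
      (fun kv => decide (|kv.1 - want_end| ≤ max_end_delta))).map (fun kv => kv.2)).flatten

-- ===== PRECONDITION & SPEC =====
-- Pre_ requires the association list's keys to be distinct — the invariant every Python dict has;
-- it excludes only Lean inputs that do not correspond to any Python dict.
def Pre_gather_end_candidates (clips_by_end : List (Int × List (List (String × Int)))) (want_end : Int) (max_end_delta : Int) : Prop :=
  (clips_by_end.map Prod.fst).Nodup
instance (clips_by_end : List (Int × List (List (String × Int)))) (want_end : Int) (max_end_delta : Int) : Decidable (Pre_gather_end_candidates clips_by_end want_end max_end_delta) := by unfold Pre_gather_end_candidates; infer_instance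
def pvWitness_gather_end_candidates : (List (Int × List (List (String × Int)))) × Int × Int :=
  ([(0, [[("a", 1)]]), (2, [])], 1, 1)

def Spec_gather_end_candidates (clips_by_end : List (Int × List (List (String × Int)))) (want_end : Int) (max_end_delta : Int) (out : List (List (String × Int))) : Prop := out = gather_end_candidates_alt clips_by_end want_end max_end_delta
instance (clips_by_end : List (Int × List (List (String × Int)))) (want_end : Int) (max_end_delta : Int) (out : List (List (String × Int))) : Decidable (Spec_gather_end_candidates clips_by_end want_end max_end_delta out) := by unfold Spec_gather_end_candidates; infer_instance

-- ===== CLAIM (what is proved, stated in full; the proofs are below) =====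
def Claim_equal_gather_end_candidates : Prop := ∀ (clips_by_end : List (Int × List (List (String × Int)))) (want_end : Int) (max_end_delta : Int), Dom_gather_end_candidates clips_by_end want_end max_end_delta → Pre_gather_end_candidates clips_by_end want_end max_end_delta → Spec_gather_end_candidates clips_by_end want_end max_end_delta (gather_end_candidates clips_by_end want_end max_end_delta)

-- ===== LEMMAS AND PROOFS =====

-- Two strictly increasing Int lists with the same members are equal.
theorem pv_lt_ext (l₁ l₂ : List Int) (h1 : l₁.Pairwise (· < ·)) (h2 : l₂.Pairwise (· < ·))
    (h : ∀ x, x ∈ l₁ ↔ x ∈ l₂) : l₁ = l₂ := by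
  have n1 : l₁.Nodup := h1.imp ne_of_lt
  have n2 : l₂.Nodup := h2.imp ne_of_lt
  exact List.Perm.eq_of_pairwise (fun a b _ _ hab hba => absurd hba (not_lt.2 hab.le)) h1 h2
    ((List.perm_ext_iff_of_nodup n1 n2).2 h)

-- Elements mapped to [] may be filtered out of a flatMap.
theorem pv_flatMap_filter {α β : Type} (l : List α) (f : α → List β) (q : α → Bool)
    (h : ∀ x ∈ l, q x = false → f x = []) : l.flatMap f = (l.filter q).flatMap f := by
  induction l with
  | nil => rfl
  | cons a t ih =>
    by_cases hq : q a
    · simp [hq, ih (fun x hx => h x (List.mem_cons_of_mem _ hx))]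
    · simp only [Bool.not_eq_true] at hq
      simp [hq, h a List.mem_cons_self hq, ih (fun x hx => h x (List.mem_cons_of_mem _ hx))]

-- getD on a key absent from the association list returns the default.
theorem pv_getD_not_mem {ν : Type} (d : List (Int × ν)) (k : Int) (dflt : ν)
    (h : k ∉ d.map Prod.fst) : (PySem.Dict.mk d).getD k dflt = dflt := by
  simp only [PySem.Dict.getD, PySem.Dict.get?]
  rw [List.find?_eq_none.2]
  · rfl
  · intro p hp hb
    exact h (List.mem_map.2 ⟨p, hp, by simpa using hb⟩)

-- getD on a pair of a nodup-keyed association list returns that pair's value.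
theorem pv_getD_mem {ν : Type} (d : List (Int × ν)) (p : Int × ν) (dflt : ν)
    (hn : (d.map Prod.fst).Nodup) (hp : p ∈ d) : (PySem.Dict.mk d).getD p.1 dflt = p.2 := by
  induction d with
  | nil => cases hp
  | cons a t ih =>
    simp only [List.map_cons, List.nodup_cons] at hn
    rcases List.mem_cons.1 hp with h | h
    · subst h
      simp [PySem.Dict.getD, PySem.Dict.get?]
    · have hne : a.1 ≠ p.1 := fun he =>
        hn.1 (he ▸ List.mem_map.2 ⟨p, h, rfl⟩)
      have := ih hn.2 h
      have hb : (a.1 == p.1) = false := beq_eq_false_iff_ne.2 hne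
      simp only [PySem.Dict.getD, PySem.Dict.get?, List.find?_cons, hb] at this ⊢
      exact this

theorem gather_end_candidates_eq_flatMap (clips_by_end : List (Int × List (List (String × Int))))
    (w m : Int) :
    gather_end_candidates clips_by_end w m =
      (PySem.List.pyRange (w - m) (w + m + 1) 1).flatMap
        (fun k => (PySem.Dict.mk clips_by_end).getD k []) := by
  unfold gather_end_candidates
  rw [PySem.List.foldl_append_eq_flatMap]
  have hshift : PySem.List.pyRange (w - m) (w + m + 1) 1 =
      (PySem.List.pyRange (-m) (m + 1) 1).map (fun d => w + d) := by
    rw [PySem.List.pyRange_one, PySem.List.pyRange_one, List.map_map]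
    have he : w + m + 1 - (w - m) = m + 1 - -m := by ring
    rw [he]
    exact List.map_congr_left (fun k _ => by simp [Function.comp]; ring)
  rw [hshift, List.flatMap_map]
  simp

-- ===== VERDICT (by name: the statement is the Claim_ definition above) =====
theorem gather_end_candidates_spec : Claim_equal_gather_end_candidates := by
  intro clips_by_end w m _ hpre
  unfold Spec_gather_end_candidates gather_end_candidates_alt
  set q : (Int × List (List (String × Int))) → Bool :=
    fun kv => decide (|kv.1 - w| ≤ m) with hq
  set S := PySem.List.sorted clips_by_end (fun kv => kv.1) false with hS
  have hSmem : ∀ p, p ∈ S ↔ p ∈ clips_by_end := fun p => PySem.List.mem_sorted clips_by_end (fun kv => kv.1) false p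
  -- B = flatMap over the keys of the filtered sorted items
  have hBval : ∀ p ∈ S.filter q,
      (fun kv => kv.2) p = (PySem.Dict.mk clips_by_end).getD p.1 [] := by
    intro p hpF
    exact (pv_getD_mem clips_by_end p [] hpre ((hSmem p).1 (List.mem_filter.1 hpF).1)).symm
  have hB : ((S.filter q).map (fun kv => kv.2)).flatten =
      ((S.filter q).map Prod.fst).flatMap (fun k => (PySem.Dict.mk clips_by_end).getD k []) := by
    rw [List.flatMap_map, ← List.flatMap_def]
    exact List.flatMap_congr hBval
  rw [gather_end_candidates_eq_flatMap, hB]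
  -- A = flatMap over the present keys of the window range
  rw [pv_flatMap_filter (PySem.List.pyRange (w - m) (w + m + 1) 1)
    (fun k => (PySem.Dict.mk clips_by_end).getD k [])
    (fun k => (PySem.Dict.mk clips_by_end).contains k)
    (fun k _ hk => pv_getD_not_mem _ _ _ (by
      intro hmem
      have hc : (PySem.Dict.mk clips_by_end).contains k = true := by
        simp only [PySem.Dict.contains]
        simp only [List.mem_map] at hmem
        obtain ⟨p, hp, he⟩ := hmem
        simp
        exact ⟨p.2, by rw [← he]; exact hp⟩
      simp [hc] at hk))]
  congr 1
  have hnS : (S.map Prod.fst).Nodup :=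
    ((PySem.List.sorted_perm clips_by_end (fun kv => kv.1) false).map Prod.fst).nodup_iff.2 hpre
  apply pv_lt_ext
  · exact (PySem.List.pairwise_lt_pyRange_one (a := w - m) (b := w + m + 1)).filter _
  · have hle : (S.filter q).Pairwise (fun p₂ p₃ => p₂.1 ≤ p₃.1) :=
      (PySem.List.sorted_pairwise (xs := clips_by_end) (key := fun kv => kv.1)).filter _
    have hnF : ((S.filter q).map Prod.fst).Nodup :=
      hnS.sublist (List.Sublist.map Prod.fst List.filter_sublist)
    have hmap : ((S.filter q).map Prod.fst).Pairwise (· ≤ ·) := hle.map _ (fun _ _ h => h)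
    exact (hmap.and (List.nodup_iff_pairwise_ne.1 hnF)).imp
      (fun h => lt_of_le_of_ne h.1 h.2)
  · intro x
    have hkey : (PySem.Dict.mk clips_by_end).contains x = true ↔
        ∃ p ∈ clips_by_end, p.1 = x := by
      simp [PySem.Dict.contains]
    simp only [List.mem_filter, PySem.List.mem_pyRange_one, List.mem_map]
    constructor
    · rintro ⟨⟨hlo, hhi⟩, hc⟩
      obtain ⟨p, hp, he⟩ := hkey.1 hc
      refine ⟨p, ⟨(hSmem p).2 hp, ?_⟩, he⟩
      simp only [hq, decide_eq_true_eq, he, abs_le]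
      omega
    · rintro ⟨p, ⟨hpS, hpq⟩, hpx⟩
      simp only [hq, decide_eq_true_eq, abs_le, hpx] at hpq
      exact ⟨⟨by omega, by omega⟩, hkey.2 ⟨p, (hSmem p).1 hpS, hpx⟩⟩
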